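-- pv_equiv track=rewrite | github.com/sariburak/SudokuHelper | solver.py | solveOneDigitInARow
-- ===== SOURCE A (Python) =====
-- import copy
--
-- def solveOneDigitInARow(grid, possibleDigits):
--     """
--     Checks if there is a digit that can only be placed in one cell in a row
--     """
--     # This is needed to avoid changing the original grid
--     grid = copy.deepcopy(grid)
--     for i in range(0, 9):
--         for digit in range(1, 10):
--             count = 0
--             for j in range(0, 9):
--                 if (i, j) in possibleDigits.keys() and digit in possibleDigits[(i, j)]:
--                     count += 1
--                     index = (i, j)
--             if count == 1:
--                 grid[index[0]][index[1]] = digit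
--     return grid
-- ===== SOURCE B (Python) =====
-- import copy
--
-- def solveOneDigitInARow(grid, possibleDigits):
--     """
--     Tabulate, in one pass over possibleDigits, how many cells of each row can
--     hold each digit (and the last such cell); then place every digit whose
--     count in its row is exactly one.
--     """
--     grid = copy.deepcopy(grid)
--     count = {}
--     last = {}
--     for (i, j), digits in possibleDigits.items():
--         if 0 <= i < 9 and 0 <= j < 9:
--             for digit in set(digits):
--                 if 1 <= digit <= 9:
--                     count[(i, digit)] = count.get((i, digit), 0) + 1
--                     last[(i, digit)] = j
--     for i in range(9):
--         for digit in range(1, 10):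
--             if count.get((i, digit), 0) == 1:
--                 grid[i][last[(i, digit)]] = digit
--     return grid
-- ===== Notes on version B (the rewrite author's own statement) =====
-- stated objective: alternative
-- what changed: A rescans all 9 columns (with a dict lookup each) for every of the 81 (row,digit) pairs; B makes a single tabulation pass over possibleDigits building count/last-cell tables per (row,digit) and then a placement pass over the 81 pairs.
import Mathlib
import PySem

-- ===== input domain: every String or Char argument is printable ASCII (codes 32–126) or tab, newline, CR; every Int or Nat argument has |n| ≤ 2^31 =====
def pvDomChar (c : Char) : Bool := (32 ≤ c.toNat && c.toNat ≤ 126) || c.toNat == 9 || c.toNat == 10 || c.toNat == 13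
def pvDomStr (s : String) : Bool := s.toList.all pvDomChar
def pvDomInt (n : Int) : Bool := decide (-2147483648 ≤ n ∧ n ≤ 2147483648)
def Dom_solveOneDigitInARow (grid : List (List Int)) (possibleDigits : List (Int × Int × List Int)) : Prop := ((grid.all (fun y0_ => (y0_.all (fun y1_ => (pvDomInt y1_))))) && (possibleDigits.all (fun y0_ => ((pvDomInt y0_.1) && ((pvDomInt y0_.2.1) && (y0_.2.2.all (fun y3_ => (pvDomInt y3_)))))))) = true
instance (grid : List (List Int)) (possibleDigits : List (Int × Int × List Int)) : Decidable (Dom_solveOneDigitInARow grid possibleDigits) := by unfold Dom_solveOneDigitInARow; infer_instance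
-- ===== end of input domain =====

-- B replaces A's 729 per-(row,digit) column rescans by one tabulation pass over
-- possibleDigits (count + last cell per (row,digit)) followed by a placement pass
-- (objective: alternative).  Equivalence is about the RETURN value; neither
-- program mutates its arguments (A deepcopies the grid, B does the same).

-- ===== PORT A =====
-- '(i, j) in possibleDigits.keys() and digit in possibleDigits[(i, j)]' :
-- first-match association-list lookup (a Python dict has unique keys).
def pdGet? (pd : List (Int × Int × List Int)) (i j : Int) : Option (List Int) :=
  match pd with
  | [] => none
  | p :: rest => if p.1 = i ∧ p.2.1 = j then some p.2.2 else pdGet? rest i j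

-- the inner 'for j in range(0, 9)' loop of A, threading (count, index)
def aInner (pd : List (Int × Int × List Int)) (i digit : Int)
    (st : Int × Option (Int × Int)) : Int × Option (Int × Int) :=
  (PySem.List.pyRange 0 9 1).foldl (fun cj j =>
    match pdGet? pd i j with
    | some ds => if digit ∈ ds then (cj.1 + 1, some (i, j)) else cj
    | none => cj) st

-- one (i, digit) iteration of A's two outer loops
def aStep (pd : List (Int × Int × List Int))
    (st : List (List Int) × Option (Int × Int)) (i digit : Int) :
    List (List Int) × Option (Int × Int) :=
  let r := aInner pd i digit (0, st.2)
  if r.1 = 1 then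
    match r.2 with
    | some idx =>
        (PySem.List.pySetD st.1 idx.1
          (PySem.List.pySetD (PySem.List.pyGetD st.1 idx.1 []) idx.2 digit), r.2)
    | none => (st.1, r.2)   -- unreachable: count = 1 forces index to be set
  else (st.1, r.2)

def solveOneDigitInARow (grid : List (List Int)) (possibleDigits : List (Int × Int × List Int)) : List (List Int) :=
  ((PySem.List.pyRange 0 9 1).foldl (fun st i =>
      (PySem.List.pyRange 1 10 1).foldl (fun st digit =>
        aStep possibleDigits st i digit) st) (grid, none)).1

-- ===== PORT B =====
-- first pass of Source B: tabulate (count, last) over possibleDigits.items()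
def bTab (pd : List (Int × Int × List Int)) :
    PySem.Dict (Int × Int) Int × PySem.Dict (Int × Int) Int :=
  pd.foldl (fun st p =>
    if 0 ≤ p.1 ∧ p.1 < 9 ∧ 0 ≤ p.2.1 ∧ p.2.1 < 9 then
      -- 'for digit in set(digits)': order-independent effect, modelled by dedup
      (PySem.List.dedup p.2.2).foldl (fun st2 d =>
        if 1 ≤ d ∧ d ≤ 9 then
          (st2.1.modify (p.1, d) 0 (· + 1), st2.2.insert (p.1, d) p.2.1)
        else st2) st
    else st) (PySem.Dict.empty, PySem.Dict.empty)

def solveOneDigitInARow_alt (grid : List (List Int)) (possibleDigits : List (Int × Int × List Int)) : List (List Int) :=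
  let t := bTab possibleDigits
  (PySem.List.pyRange 0 9 1).foldl (fun g i =>
    (PySem.List.pyRange 1 10 1).foldl (fun g d =>
      if t.1.getD (i, d) 0 = 1 then
        -- last[(i, digit)] is present whenever count[(i, digit)] == 1
        PySem.List.pySetD g i
          (PySem.List.pySetD (PySem.List.pyGetD g i []) (t.2.getD (i, d) 0) d)
      else g) g) grid

-- ===== PRECONDITION & SPEC =====
-- cells (column indices) of row i that can hold digit d, in possibleDigits order
def pvOccs (pd : List (Int × Int × List Int)) (i d : Int) : List Int :=
  pd.filterMap (fun p =>
    if p.1 = i ∧ 0 ≤ p.2.1 ∧ p.2.1 < 9 ∧ d ∈ p.2.2 then some p.2.1 else none)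

-- Pre_ excludes (a) association lists with duplicate keys, which represent no
-- Python dict (a dict's keys are unique), and (b) inputs on which A raises
-- IndexError: a digit uniquely placeable at a cell that lies outside grid.
def Pre_solveOneDigitInARow (grid : List (List Int)) (possibleDigits : List (Int × Int × List Int)) : Prop :=
  (possibleDigits.map (fun p => (p.1, p.2.1))).Nodup ∧
  ∀ i ∈ PySem.List.pyRange 0 9 1, ∀ d ∈ PySem.List.pyRange 1 10 1,
    (pvOccs possibleDigits i d).length = 1 →
      i.toNat < grid.length ∧
      ((pvOccs possibleDigits i d).getD 0 0).toNat < (grid.getD i.toNat []).length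

instance (grid : List (List Int)) (possibleDigits : List (Int × Int × List Int)) : Decidable (Pre_solveOneDigitInARow grid possibleDigits) := by
  unfold Pre_solveOneDigitInARow; infer_instance

def pvWitness_solveOneDigitInARow : List (List Int) × (List (Int × Int × List Int)) :=
  ([[0, 0, 0, 0, 0, 0, 0, 0, 0]], [(0, 3, [4])])

def Spec_solveOneDigitInARow (grid : List (List Int)) (possibleDigits : List (Int × Int × List Int)) (out : List (List Int)) : Prop := out = solveOneDigitInARow_alt grid possibleDigits
instance (grid : List (List Int)) (possibleDigits : List (Int × Int × List Int)) (out : List (List Int)) : Decidable (Spec_solveOneDigitInARow grid possibleDigits out) := by unfold Spec_solveOneDigitInARow; infer_instance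

-- ===== CLAIM (what is proved, stated in full; the proofs are below) =====
def Claim_equal_solveOneDigitInARow : Prop := ∀ (grid : List (List Int)) (possibleDigits : List (Int × Int × List Int)), Dom_solveOneDigitInARow grid possibleDigits → Pre_solveOneDigitInARow grid possibleDigits → Spec_solveOneDigitInARow grid possibleDigits (solveOneDigitInARow grid possibleDigits)

-- ===== LEMMAS AND PROOFS =====

-- writing digit d at cell (i, j)
def pvPlace (g : List (List Int)) (i j d : Int) : List (List Int) :=
  PySem.List.pySetD g i (PySem.List.pySetD (PySem.List.pyGetD g i []) j d)

-- the canonical per-(i, d) placement step both programs implement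
def pvGStep (pd : List (Int × Int × List Int)) (g : List (List Int)) (i d : Int) : List (List Int) :=
  if (pvOccs pd i d).length = 1 then pvPlace g i ((pvOccs pd i d).getD 0 0) d else g

theorem pvOccs_cons (p : Int × Int × List Int) (pd : List (Int × Int × List Int)) (i d : Int) :
    pvOccs (p :: pd) i d =
      if p.1 = i ∧ 0 ≤ p.2.1 ∧ p.2.1 < 9 ∧ d ∈ p.2.2
      then p.2.1 :: pvOccs pd i d else pvOccs pd i d := by
  simp only [pvOccs, List.filterMap_cons]
  split_ifs <;> simp

theorem pvOccs_mem (pd : List (Int × Int × List Int)) (i d j : Int) :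
    j ∈ pvOccs pd i d ↔
      ∃ p ∈ pd, p.1 = i ∧ p.2.1 = j ∧ 0 ≤ j ∧ j < 9 ∧ d ∈ p.2.2 := by
  simp only [pvOccs, List.mem_filterMap]
  constructor
  · rintro ⟨p, hp, h⟩
    by_cases hc : p.1 = i ∧ 0 ≤ p.2.1 ∧ p.2.1 < 9 ∧ d ∈ p.2.2
    · rw [if_pos hc] at h
      obtain ⟨h1, h2, h3, h4⟩ := hc
      obtain rfl : p.2.1 = j := by injection h
      exact ⟨p, hp, h1, rfl, h2, h3, h4⟩
    · rw [if_neg hc] at h; cases h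
  · rintro ⟨p, hp, h1, h2, h3, h4, h5⟩
    exact ⟨p, hp, by subst h2; simp [h1, h3, h4, h5]⟩

theorem pdGet?_eq_some_iff (pd : List (Int × Int × List Int)) (i j : Int)
    (hnd : (pd.map (fun p => (p.1, p.2.1))).Nodup) (v : List Int) :
    pdGet? pd i j = some v ↔ (i, j, v) ∈ pd := by
  induction pd with
  | nil => simp [pdGet?]
  | cons p rest ih =>
    obtain ⟨pi, pj, pv⟩ := p
    simp only [List.map_cons, List.nodup_cons, List.mem_map] at hnd
    obtain ⟨hkey, hrest⟩ := hnd
    simp only [pdGet?, List.mem_cons]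
    split_ifs with hc
    · obtain ⟨h1, h2⟩ := hc
      subst h1; subst h2
      constructor
      · rintro h
        simp only [Option.some.injEq] at h
        subst h
        exact Or.inl rfl
      · rintro (h | h)
        · rw [Prod.mk.injEq, Prod.mk.injEq] at h
          rw [h.2.2]
        · exfalso
          exact hkey ⟨(pi, pj, v), h, rfl⟩
    · rw [ih hrest]
      constructor
      · exact Or.inr
      · rintro (h | h)
        · exfalso; apply hc
          rw [Prod.mk.injEq, Prod.mk.injEq] at h
          exact ⟨h.1.symm, h.2.1.symm⟩
        · exact h

theorem pvOccs_nodup (pd : List (Int × Int × List Int)) (i d : Int)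
    (hnd : (pd.map (fun p => (p.1, p.2.1))).Nodup) : (pvOccs pd i d).Nodup := by
  induction pd with
  | nil => simp [pvOccs]
  | cons p rest ih =>
    simp only [List.map_cons, List.nodup_cons, List.mem_map] at hnd
    obtain ⟨hkey, hrest⟩ := hnd
    rw [pvOccs_cons]
    split_ifs with hc
    · refine List.nodup_cons.2 ⟨?_, ih hrest⟩
      intro hmem
      rw [pvOccs_mem] at hmem
      obtain ⟨q, hq, h1, h2, _⟩ := hmem
      exact hkey ⟨q, hq, by simp [h1, h2, hc.1]⟩
    · exact ih hrest

-- A's inner loop counts the matching columns of the scanned range and records the last one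
theorem aInner_foldl (pd : List (Int × Int × List Int)) (i digit : Int) (L : List Int) :
    ∀ (c0 : Int) (idx0 : Option (Int × Int)),
      L.foldl (fun cj j =>
        match pdGet? pd i j with
        | some ds => if digit ∈ ds then (cj.1 + 1, some (i, j)) else cj
        | none => cj) (c0, idx0) =
      (c0 + ((L.filter (fun j =>
          match pdGet? pd i j with
          | some ds => decide (digit ∈ ds)
          | none => false)).length : Int),
       match (L.filter (fun j =>
          match pdGet? pd i j with
          | some ds => decide (digit ∈ ds)
          | none => false)).getLast? with
       | some j => some (i, j)
       | none => idx0) := by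
  induction L with
  | nil => intro c0 idx0; simp
  | cons x L ih =>
    intro c0 idx0
    rw [List.foldl_cons, List.filter_cons]
    rcases hx : pdGet? pd i x with _ | ds
    · simpa [hx] using ih c0 idx0
    · by_cases hd : digit ∈ ds
      · simp only [hd, decide_true, if_true]
        rw [show (((c0 : Int), idx0).1 + 1, some (i, x)) = ((c0 + 1 : Int), some (i, x)) from rfl,
          ih (c0 + 1) (some (i, x))]
        rw [Prod.mk.injEq]
        refine ⟨by simp only [List.length_cons]; push_cast; ring, ?_⟩
        rcases hL : (L.filter (fun j =>
            match pdGet? pd i j with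
            | some ds => decide (digit ∈ ds)
            | none => false)).getLast? with _ | j
        · simp [List.getLast?_cons, hL]
        · simp [List.getLast?_cons, hL]
      · simpa [hx, hd] using ih c0 idx0

-- the column list A scans, in ascending order
def pvCells (pd : List (Int × Int × List Int)) (i d : Int) : List Int :=
  (PySem.List.pyRange 0 9 1).filter (fun j =>
    match pdGet? pd i j with
    | some ds => decide (d ∈ ds)
    | none => false)

theorem aInner_eq (pd : List (Int × Int × List Int)) (i digit : Int) (idx0 : Option (Int × Int)) :
    aInner pd i digit (0, idx0) =
      (((pvCells pd i digit).length : Int),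
       match (pvCells pd i digit).getLast? with
       | some j => some (i, j)
       | none => idx0) := by
  rw [aInner, aInner_foldl, zero_add, pvCells]

theorem pvCells_perm (pd : List (Int × Int × List Int)) (i d : Int)
    (hnd : (pd.map (fun p => (p.1, p.2.1))).Nodup) :
    (pvCells pd i d).Perm (pvOccs pd i d) := by
  have hcnd : (pvCells pd i d).Nodup := by
    rw [pvCells]; exact List.Nodup.filter _ (PySem.List.nodup_pyRange_one 0 9)
  rw [List.perm_ext_iff_of_nodup hcnd (pvOccs_nodup pd i d hnd)]
  intro j
  rw [pvCells, List.mem_filter, PySem.List.mem_pyRange_one, pvOccs_mem]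
  constructor
  · rintro ⟨⟨hj0, hj9⟩, hm⟩
    rcases hg : pdGet? pd i j with _ | ds
    · simp [hg] at hm
    · simp only [hg] at hm
      rw [pdGet?_eq_some_iff pd i j hnd] at hg
      exact ⟨(i, j, ds), hg, rfl, rfl, hj0, hj9, by simpa using hm⟩
  · rintro ⟨p, hp, h1, h2, h3, h4, h5⟩
    refine ⟨⟨h3, h4⟩, ?_⟩
    have : pdGet? pd i j = some p.2.2 := by
      rw [pdGet?_eq_some_iff pd i j hnd]
      obtain ⟨pi, pj, pv⟩ := p
      simp only at h1 h2
      subst h1; subst h2; exact hp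
    simp [this, h5]

-- A's (i, digit) step updates the grid exactly like pvGStep (the index is threadedly irrelevant)
theorem aStep_fst (pd : List (Int × Int × List Int))
    (hnd : (pd.map (fun p => (p.1, p.2.1))).Nodup)
    (st : List (List Int) × Option (Int × Int)) (i d : Int) :
    (aStep pd st i d).1 = pvGStep pd st.1 i d := by
  have hperm := pvCells_perm pd i d hnd
  have hlen : (pvCells pd i d).length = (pvOccs pd i d).length := hperm.length_eq
  simp only [aStep, aInner_eq]
  by_cases hocc : (pvOccs pd i d).length = 1
  · have hc1 : pvCells pd i d = [(pvOccs pd i d).getD 0 0] := by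
      obtain ⟨j, hj⟩ := List.length_eq_one_iff.1 hocc
      rw [hj]
      exact List.perm_singleton.1 (hj ▸ hperm)
    rw [hc1]
    simp [pvGStep, hocc, pvPlace]
  · have hc1 : ((pvCells pd i d).length : Int) ≠ 1 := by
      rw [hlen]; exact_mod_cast hocc
    rw [if_neg hc1, pvGStep, if_neg hocc]

-- a fold whose first component ignores the second projects to a fold
theorem foldl_fst {α β γ : Type} (L : List γ) (F : α × β → γ → α × β) (f : α → γ → α)
    (h : ∀ s x, (F s x).1 = f s.1 x) : ∀ s : α × β, (L.foldl F s).1 = L.foldl f s.1 := by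
  induction L with
  | nil => intro s; rfl
  | cons x L ih =>
    intro s
    rw [List.foldl_cons, List.foldl_cons, ih, h]

-- ===== B-side characterisation =====

-- inner fold over set(digits): effect on count at key (i, d)
theorem bInner_cnt (i d pi j : Int) (L : List Int) (hL : L.Nodup) :
    ∀ (st : PySem.Dict (Int × Int) Int × PySem.Dict (Int × Int) Int),
      ((L.foldl (fun st2 dg =>
          if 1 ≤ dg ∧ dg ≤ 9 then
            (st2.1.modify (pi, dg) 0 (· + 1), st2.2.insert (pi, dg) j)
          else st2) st).1.getD (i, d) 0) =
        st.1.getD (i, d) 0 + (if pi = i ∧ d ∈ L ∧ 1 ≤ d ∧ d ≤ 9 then 1 else 0) := by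
  induction L with
  | nil => intro st; simp
  | cons x L ih =>
    intro st
    obtain ⟨hx, hL'⟩ := List.nodup_cons.1 hL
    rw [List.foldl_cons]
    by_cases hg : 1 ≤ x ∧ x ≤ 9
    · rw [if_pos hg, ih hL']
      simp only [PySem.Dict.getD_modify]
      by_cases hk : (i, d) = (pi, x)
      · obtain ⟨h1, h2⟩ := Prod.mk.injEq .. ▸ hk
        subst h1; subst h2
        simp [hx, hg]
      · rw [if_neg hk]
        by_cases hm : pi = i ∧ d ∈ x :: L ∧ 1 ≤ d ∧ d ≤ 9
        · obtain ⟨h1, hm2, h3, h4⟩ := hm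
          have hdL : d ∈ L := by
            rcases List.mem_cons.1 hm2 with h | h
            · exfalso; exact hk (by simp [h1, h])
            · exact h
          simp [h1, hdL, h3, h4]
        · have h2 : ¬ (pi = i ∧ d ∈ L ∧ 1 ≤ d ∧ d ≤ 9) := by
            intro ⟨h1, h2, h3, h4⟩; exact hm ⟨h1, List.mem_cons_of_mem _ h2, h3, h4⟩
          rw [if_neg hm, if_neg h2]
    · rw [if_neg hg, ih hL']
      congr 1
      by_cases hm : pi = i ∧ d ∈ L ∧ 1 ≤ d ∧ d ≤ 9
      · rw [if_pos hm, if_pos ⟨hm.1, List.mem_cons_of_mem _ hm.2.1, hm.2.2⟩]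
      · have h2 : ¬ (pi = i ∧ d ∈ x :: L ∧ 1 ≤ d ∧ d ≤ 9) := by
          intro ⟨h1, h2, h3, h4⟩
          rcases List.mem_cons.1 h2 with h | h
          · subst h; exact hg ⟨h3, h4⟩
          · exact hm ⟨h1, h, h3, h4⟩
        rw [if_neg hm, if_neg h2]

-- inner fold over set(digits): effect on last at key (i, d)
theorem bInner_last (i d pi j : Int) (L : List Int) :
    ∀ (st : PySem.Dict (Int × Int) Int × PySem.Dict (Int × Int) Int),
      ((L.foldl (fun st2 dg =>
          if 1 ≤ dg ∧ dg ≤ 9 then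
            (st2.1.modify (pi, dg) 0 (· + 1), st2.2.insert (pi, dg) j)
          else st2) st).2.getD (i, d) 0) =
        if pi = i ∧ d ∈ L ∧ 1 ≤ d ∧ d ≤ 9 then j else st.2.getD (i, d) 0 := by
  induction L with
  | nil => intro st; simp
  | cons x L ih =>
    intro st
    rw [List.foldl_cons]
    by_cases hg : 1 ≤ x ∧ x ≤ 9
    · rw [if_pos hg, ih]
      by_cases hm : pi = i ∧ d ∈ L ∧ 1 ≤ d ∧ d ≤ 9
      · simp [hm, List.mem_cons_of_mem _ hm.2.1]
      · rw [if_neg hm]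
        simp only [PySem.Dict.getD_insert]
        by_cases hk : (i, d) = (pi, x)
        · obtain ⟨h1, h2⟩ := Prod.mk.injEq .. ▸ hk
          subst h1; subst h2
          simp [hg]
        · rw [if_neg hk]
          have : ¬ (pi = i ∧ d ∈ x :: L ∧ 1 ≤ d ∧ d ≤ 9) := by
            intro ⟨h1, h2, h3, h4⟩
            rcases List.mem_cons.1 h2 with h | h
            · exact hk (by simp [h1, h])
            · exact hm ⟨h1, h, h3, h4⟩
          rw [if_neg this]
    · rw [if_neg hg, ih]
      by_cases hm : pi = i ∧ d ∈ L ∧ 1 ≤ d ∧ d ≤ 9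
      · simp [hm, List.mem_cons_of_mem _ hm.2.1]
      · have h2 : ¬ (pi = i ∧ d ∈ x :: L ∧ 1 ≤ d ∧ d ≤ 9) := by
          intro ⟨h1, h2, h3, h4⟩
          rcases List.mem_cons.1 h2 with h | h
          · subst h; exact hg ⟨h3, h4⟩
          · exact hm ⟨h1, h, h3, h4⟩
        rw [if_neg hm, if_neg h2]

-- the tabulation pass: count counts pvOccs, last is its last element
theorem bTab_spec (pd : List (Int × Int × List Int)) (i d : Int)
    (hi : 0 ≤ i ∧ i < 9) (hd : 1 ≤ d ∧ d ≤ 9) :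
    ∀ (st : PySem.Dict (Int × Int) Int × PySem.Dict (Int × Int) Int),
      ((pd.foldl (fun st p =>
          if 0 ≤ p.1 ∧ p.1 < 9 ∧ 0 ≤ p.2.1 ∧ p.2.1 < 9 then
            (PySem.List.dedup p.2.2).foldl (fun st2 dg =>
              if 1 ≤ dg ∧ dg ≤ 9 then
                (st2.1.modify (p.1, dg) 0 (· + 1), st2.2.insert (p.1, dg) p.2.1)
              else st2) st
          else st) st).1.getD (i, d) 0 =
            st.1.getD (i, d) 0 + ((pvOccs pd i d).length : Int)) ∧
      ((pd.foldl (fun st p =>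
          if 0 ≤ p.1 ∧ p.1 < 9 ∧ 0 ≤ p.2.1 ∧ p.2.1 < 9 then
            (PySem.List.dedup p.2.2).foldl (fun st2 dg =>
              if 1 ≤ dg ∧ dg ≤ 9 then
                (st2.1.modify (p.1, dg) 0 (· + 1), st2.2.insert (p.1, dg) p.2.1)
              else st2) st
          else st) st).2.getD (i, d) 0 =
            (pvOccs pd i d).foldl (fun _ j => j) (st.2.getD (i, d) 0)) := by
  induction pd with
  | nil => intro st; simp [pvOccs]
  | cons p rest ih =>
    intro st
    rw [List.foldl_cons, pvOccs_cons]
    by_cases hb : 0 ≤ p.1 ∧ p.1 < 9 ∧ 0 ≤ p.2.1 ∧ p.2.1 < 9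
    · rw [if_pos hb]
      obtain ⟨ih1, ih2⟩ := ih ((PySem.List.dedup p.2.2).foldl (fun st2 dg =>
          if 1 ≤ dg ∧ dg ≤ 9 then
            (st2.1.modify (p.1, dg) 0 (· + 1), st2.2.insert (p.1, dg) p.2.1)
          else st2) st)
      rw [ih1, ih2, bInner_cnt i d p.1 p.2.1 _ (PySem.List.nodup_dedup _),
        bInner_last i d p.1 p.2.1]
      by_cases hc : p.1 = i ∧ 0 ≤ p.2.1 ∧ p.2.1 < 9 ∧ d ∈ p.2.2
      · have hm : p.1 = i ∧ d ∈ PySem.List.dedup p.2.2 ∧ 1 ≤ d ∧ d ≤ 9 :=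
          ⟨hc.1, (PySem.List.mem_dedup _ _).2 hc.2.2.2, hd.1, hd.2⟩
        rw [if_pos hc, if_pos hm, if_pos hm]
        constructor
        · simp; omega
        · simp
      · have hm : ¬ (p.1 = i ∧ d ∈ PySem.List.dedup p.2.2 ∧ 1 ≤ d ∧ d ≤ 9) := by
          intro ⟨h1, h2, _, _⟩
          exact hc ⟨h1, hb.2.2.1, hb.2.2.2, (PySem.List.mem_dedup _ _).1 h2⟩
        rw [if_neg hc, if_neg hm, if_neg hm]
        exact ⟨by omega, rfl⟩
    · rw [if_neg hb]
      have hc : ¬ (p.1 = i ∧ 0 ≤ p.2.1 ∧ p.2.1 < 9 ∧ d ∈ p.2.2) := by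
        intro ⟨h1, h2, h3, _⟩
        exact hb ⟨h1 ▸ hi.1, h1 ▸ hi.2, h2, h3⟩
      rw [if_neg hc]
      exact ih st

-- B's placement step equals pvGStep for in-range (i, d)
theorem bStep_eq (pd : List (Int × Int × List Int)) (i d : Int)
    (hi : 0 ≤ i ∧ i < 9) (hd : 1 ≤ d ∧ d ≤ 9) (g : List (List Int)) :
    (if (bTab pd).1.getD (i, d) 0 = 1 then
        PySem.List.pySetD g i
          (PySem.List.pySetD (PySem.List.pyGetD g i []) ((bTab pd).2.getD (i, d) 0) d)
      else g) = pvGStep pd g i d := by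
  obtain ⟨h1, h2⟩ := bTab_spec pd i d hi hd (PySem.Dict.empty, PySem.Dict.empty)
  rw [bTab, h1, h2]
  simp only [PySem.Dict.getD_empty, zero_add]
  by_cases hlen : ((pvOccs pd i d).length : Int) = 1
  · have hocc1 : (pvOccs pd i d).length = 1 := by omega
    obtain ⟨j, hj⟩ := List.length_eq_one_iff.1 hocc1
    rw [if_pos hlen, pvGStep, if_pos hocc1, hj]
    simp [pvPlace]
  · have hocc1 : ¬ ((pvOccs pd i d).length = 1) := by omega
    rw [if_neg hlen, pvGStep, if_neg hocc1]

-- ===== VERDICT (by name: the statement is the Claim_ definition above) =====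
theorem solveOneDigitInARow_spec : Claim_equal_solveOneDigitInARow := by
  intro grid pd _ hpre
  obtain ⟨hnd, _⟩ := hpre
  unfold Spec_solveOneDigitInARow solveOneDigitInARow solveOneDigitInARow_alt
  -- A's nested fold projects to the canonical pvGStep fold
  have hA : ((PySem.List.pyRange 0 9 1).foldl (fun st i =>
      (PySem.List.pyRange 1 10 1).foldl (fun st digit => aStep pd st i digit) st)
        (grid, (none : Option (Int × Int)))).1 =
      (PySem.List.pyRange 0 9 1).foldl (fun g i =>
        (PySem.List.pyRange 1 10 1).foldl (fun g d => pvGStep pd g i d) g) grid := by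
    refine foldl_fst _ _ _ ?_ (grid, none)
    intro s i
    refine foldl_fst _ _ _ ?_ s
    intro s' d
    exact aStep_fst pd hnd s' i d
  rw [hA]
  -- B's nested fold is the same canonical fold
  have hB : (PySem.List.pyRange 0 9 1).foldl (fun g i =>
      (PySem.List.pyRange 1 10 1).foldl (fun g d =>
        if (bTab pd).1.getD (i, d) 0 = 1 then
          PySem.List.pySetD g i
            (PySem.List.pySetD (PySem.List.pyGetD g i []) ((bTab pd).2.getD (i, d) 0) d)
        else g) g) grid =
      (PySem.List.pyRange 0 9 1).foldl (fun g i =>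
        (PySem.List.pyRange 1 10 1).foldl (fun g d => pvGStep pd g i d) g) grid := by
    refine PySem.List.foldl_congr_mem _ _ _ _ ?_
    intro g i hi
    refine PySem.List.foldl_congr_mem _ _ _ _ ?_
    intro g' d hd
    have hi' : 0 ≤ i ∧ i < 9 := by
      have := PySem.List.mem_pyRange_one.1 hi; omega
    have hd' : 1 ≤ d ∧ d ≤ 9 := by
      have := PySem.List.mem_pyRange_one.1 hd; omega
    exact bStep_eq pd i d hi' hd' g'
  exact hB.symm
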